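-- pv_equiv track=rewrite | github.com/gaimplan/battlecard_generator | scripts/json_to_markdown.py | format_action_plan
-- ===== SOURCE A (Python) =====
-- def format_action_plan(plan: dict, sources_list: list) -> str:
--     """Format action plan section and collect sources."""
--     md = "# Action Plan\n\n"
--     if 'action_plan' in plan:
--         inner = plan['action_plan']
--         if 'value_that_closes' in inner:
--             md += "## Value That Closes\n\n"
--             for value in inner['value_that_closes']:
--                 md += f"- {value}\n"
--             md += "\n"
--         if 'next_steps' in inner:
--             md += "## Next Steps\n\n"
--             for step in inner['next_steps']:
--                 md += f"- {step}\n"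
--             md += "\n"
--         if 'sales_playbook' in inner:
--             md += "## Sales Playbook\n\n"
--             for play in inner['sales_playbook']:
--                 md += f"- {play}\n"
--             md += "\n"
--     if 'sources' in plan:
--         sources_list.extend(plan['sources'])
--     return md
-- ===== SOURCE B (Python) =====
-- _SECTIONS = [
--     ("value_that_closes", "Value That Closes"),
--     ("next_steps", "Next Steps"),
--     ("sales_playbook", "Sales Playbook"),
-- ]
--
-- def format_action_plan(plan: dict, sources_list: list) -> str:
--     """Build the document as a list of LINES (recursively, back to front over the
--     section table) and join them once with newlines at the end."""
--     def section_lines(inner, specs):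
--         if not specs:
--             return []
--         (key, heading) = specs[0]
--         rest = section_lines(inner, specs[1:])
--         if key not in inner:
--             return rest
--         return ["## " + heading, ""] + [f"- {v}" for v in inner[key]] + [""] + rest
--
--     lines = ["# Action Plan", ""]
--     if 'action_plan' in plan:
--         lines = lines + section_lines(plan['action_plan'], _SECTIONS)
--     if 'sources' in plan:
--         sources_list.extend(plan['sources'])
--     return "\n".join(lines) + "\n"
-- ===== Notes on version B (the rewrite author's own statement) =====
-- stated objective: alternative
-- what changed: B builds the document as a list of lines produced by a recursive helper over a (key, heading) section table and joins them once with newline, instead of A's imperative chunk-by-chunk string concatenation with three unrolled if-blocks.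
import Mathlib
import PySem

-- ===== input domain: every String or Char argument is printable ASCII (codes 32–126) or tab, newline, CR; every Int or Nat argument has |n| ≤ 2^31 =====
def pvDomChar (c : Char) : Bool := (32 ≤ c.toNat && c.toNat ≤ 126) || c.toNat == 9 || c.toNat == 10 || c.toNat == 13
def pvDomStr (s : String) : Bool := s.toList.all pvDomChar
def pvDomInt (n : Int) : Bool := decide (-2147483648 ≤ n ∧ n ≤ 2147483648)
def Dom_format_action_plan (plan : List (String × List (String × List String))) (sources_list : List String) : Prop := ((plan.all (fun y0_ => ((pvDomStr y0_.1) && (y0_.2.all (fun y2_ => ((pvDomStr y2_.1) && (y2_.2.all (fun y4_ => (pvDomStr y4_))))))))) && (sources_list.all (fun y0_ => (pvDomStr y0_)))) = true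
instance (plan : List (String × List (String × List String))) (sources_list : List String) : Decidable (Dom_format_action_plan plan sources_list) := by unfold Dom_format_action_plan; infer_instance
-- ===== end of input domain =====

-- B builds the document as a list of LINES, produced recursively (back to front) over a
-- section table, and joins them once with "\n" at the end, instead of A's imperative
-- chunk-by-chunk string concatenation (objective: simpler). A also mutates sources_list
-- in place (extend); the equivalence proved here is about the RETURN value only, and
-- Python B performs the same mutation.

-- ===== PORT A =====
def format_action_plan (plan : List (String × List (String × List String))) (sources_list : List String) : String :=
  let _ := sources_list
  let md := "# Action Plan\n\n"
  let md :=
    match (PySem.Dict.mk plan).get? "action_plan" with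
    | some innerL =>
      let inner := PySem.Dict.mk innerL
      let md :=
        match inner.get? "value_that_closes" with
        | some vs => (vs.foldl (fun m v => m ++ ("- " ++ v ++ "\n")) (md ++ "## Value That Closes\n\n")) ++ "\n"
        | none => md
      let md :=
        match inner.get? "next_steps" with
        | some vs => (vs.foldl (fun m v => m ++ ("- " ++ v ++ "\n")) (md ++ "## Next Steps\n\n")) ++ "\n"
        | none => md
      let md :=
        match inner.get? "sales_playbook" with
        | some vs => (vs.foldl (fun m v => m ++ ("- " ++ v ++ "\n")) (md ++ "## Sales Playbook\n\n")) ++ "\n"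
        | none => md
      md
    | none => md
  md

-- ===== PORT B =====
def pvSections : List (String × String) :=
  [("value_that_closes", "Value That Closes"),
   ("next_steps", "Next Steps"),
   ("sales_playbook", "Sales Playbook")]

-- recursive helper section_lines from Source B: lines for the remaining section specs
def pvSectionLines (inner : PySem.Dict String (List String)) : List (String × String) → List String
  | [] => []
  | (key, heading) :: specs =>
    let rest := pvSectionLines inner specs
    match inner.get? key with
    | none => rest
    | some items => ["## " ++ heading, ""] ++ items.map (fun v => "- " ++ v) ++ [""] ++ rest

def format_action_plan_alt (plan : List (String × List (String × List String))) (sources_list : List String) : String :=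
  let _ := sources_list
  let lines := ["# Action Plan", ""]
  let lines :=
    match (PySem.Dict.mk plan).get? "action_plan" with
    | some innerL => lines ++ pvSectionLines (PySem.Dict.mk innerL) pvSections
    | none => lines
  PySem.Str.join "\n" lines ++ "\n"

-- ===== PRECONDITION & SPEC =====
def Spec_format_action_plan (plan : List (String × List (String × List String))) (sources_list : List String) (out : String) : Prop := out = format_action_plan_alt plan sources_list
instance (plan : List (String × List (String × List String))) (sources_list : List String) (out : String) : Decidable (Spec_format_action_plan plan sources_list out) := by unfold Spec_format_action_plan; infer_instance

-- ===== CLAIM (what is proved, stated in full; the proofs are below) =====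
def Claim_equal_format_action_plan : Prop := ∀ (plan : List (String × List (String × List String))) (sources_list : List String), Dom_format_action_plan plan sources_list → Spec_format_action_plan plan sources_list (format_action_plan plan sources_list)

-- ===== LEMMAS AND PROOFS =====

-- each line followed by a newline, concatenated
def pvConcatLines (ls : List String) : String :=
  ls.foldr (fun l acc => l ++ "\n" ++ acc) ""

theorem pvConcatLines_nil : pvConcatLines [] = "" := rfl

theorem pvConcatLines_cons (a : String) (ls : List String) :
    pvConcatLines (a :: ls) = a ++ "\n" ++ pvConcatLines ls := rfl

theorem pvConcatLines_append (xs ys : List String) :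
    pvConcatLines (xs ++ ys) = pvConcatLines xs ++ pvConcatLines ys := by
  induction xs with
  | nil => simp [pvConcatLines]
  | cons a xs ih =>
    simp only [pvConcatLines, List.cons_append, List.foldr_cons] at ih ⊢
    rw [ih]
    simp [String.append_assoc]

theorem pvJoin_singleton (a : String) : PySem.Str.join "\n" [a] = a := by
  apply String.toList_inj.mp
  simp [PySem.Str.toList_join, PySem.Chars.join_singleton]

theorem pvJoin_cons_cons (a b : String) (ls : List String) :
    PySem.Str.join "\n" (a :: b :: ls) = a ++ "\n" ++ PySem.Str.join "\n" (b :: ls) := by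
  apply String.toList_inj.mp
  simp [PySem.Str.toList_join, PySem.Chars.join_cons_cons]

theorem pvJoin_newline (ls : List String) (a : String) :
    PySem.Str.join "\n" (a :: ls) ++ "\n" = pvConcatLines (a :: ls) := by
  induction ls generalizing a with
  | nil => simp [pvJoin_singleton, pvConcatLines]
  | cons b ls ih =>
    rw [pvJoin_cons_cons]
    simp only [pvConcatLines, List.foldr_cons] at ih ⊢
    rw [String.append_assoc, String.append_assoc, ih b]
    simp [String.append_assoc]

-- A's bullet foldl is its start followed by the bullet lines
theorem pvBullets (items : List String) (s : String) :
    items.foldl (fun m v => m ++ "- " ++ v ++ "\n") s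
      = s ++ pvConcatLines (items.map (fun v => "- " ++ v)) := by
  induction items generalizing s with
  | nil => simp [pvConcatLines]
  | cons v items ih =>
    simp only [List.foldl_cons, List.map_cons, pvConcatLines_cons]
    rw [ih]
    simp [String.append_assoc]



-- literal-merging helpers (closed parts proved by evaluation)
theorem pvM1 : ("# Action Plan\n\n" : String) ++ "## Value That Closes\n\n" = "# Action Plan\n\n## Value That Closes\n\n" := by decide
theorem pvM2 : ("# Action Plan\n\n" : String) ++ "## Next Steps\n\n" = "# Action Plan\n\n## Next Steps\n\n" := by decide
theorem pvM3 : ("# Action Plan\n\n" : String) ++ "## Sales Playbook\n\n" = "# Action Plan\n\n## Sales Playbook\n\n" := by decide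
theorem pvM4 (x : String) : x ++ "\n" ++ "## Next Steps\n\n" = x ++ "\n## Next Steps\n\n" := by
  rw [String.append_assoc]; congr 1
theorem pvM5 (x : String) : x ++ "\n" ++ "## Sales Playbook\n\n" = x ++ "\n## Sales Playbook\n\n" := by
  rw [String.append_assoc]; congr 1

-- ===== VERDICT (by name: the statement is the Claim_ definition above) =====
theorem format_action_plan_spec : Claim_equal_format_action_plan := by
  intro plan sources_list _
  unfold Spec_format_action_plan format_action_plan format_action_plan_alt pvSections
  cases (PySem.Dict.mk plan).get? "action_plan" with
  | none => decide
  | some innerL =>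
    simp only []
    cases h1 : (PySem.Dict.mk innerL).get? "value_that_closes" <;>
      cases h2 : (PySem.Dict.mk innerL).get? "next_steps" <;>
        cases h3 : (PySem.Dict.mk innerL).get? "sales_playbook" <;>
          (simp only [pvSectionLines, h1, h2, h3, List.cons_append, List.nil_append, List.append_nil]
           rw [pvJoin_newline]
           simp [pvConcatLines_append, pvConcatLines_nil, pvConcatLines_cons, pvBullets,
                 pvM1, pvM2, pvM3, pvM4, pvM5, ← String.append_assoc])
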